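-- pv_equiv track=rewrite | github.com/Krzaczek24/EksploratorTekstu | helpers/tools.py | convert_words_to_emotions
-- ===== SOURCE A (Python) =====
-- def convert_words_to_emotions(unique_words, emotion_definitions, emotion_names, with_unclassified=False):
--     word_type_emotions = {}
--     word_emotion_types = {}
--
--     for type in unique_words:
--         word_type_emotions[type] = {}
--         for key in emotion_names:
--             word_type_emotions[type][key] = 0
--
--     for key in emotion_names:
--         word_emotion_types[key] = {}
--         for type in unique_words:
--             word_emotion_types[key][type] = 0
--
--     for type in unique_words:
--         for word in unique_words[type]:
--             emotion = emotion_definitions.get(word)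
--             if emotion is not None:
--                 word_type_emotions[type][emotion] += 1
--                 word_emotion_types[emotion][type] += 1
--
--     for key in emotion_names:
--         word_emotion_types[emotion_names[key]] = word_emotion_types.pop(key)
--         for type in unique_words:
--             word_type_emotions[type][emotion_names[key]] = word_type_emotions[type].pop(key)
--
--     if not with_unclassified:
--         del word_emotion_types['Unclassified']
--         for type in unique_words:
--             del word_type_emotions[type]['Unclassified']
--     return word_type_emotions, word_emotion_types
-- ===== SOURCE B (Python) =====
-- def convert_words_to_emotions(unique_words, emotion_definitions, emotion_names, with_unclassified=False):
--     # one counting pass + dense builds, instead of zero-init / increment / rename-by-pop / delete passes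
--     names = [(k, d) for k, d in emotion_names.items()
--              if with_unclassified or d != 'Unclassified']
--     counts = {}
--     for t, words in unique_words.items():
--         c = {}
--         for w in words:
--             e = emotion_definitions.get(w)
--             if e is not None:
--                 c[e] = c.get(e, 0) + 1
--         counts[t] = c
--     word_type_emotions = {t: {d: counts[t].get(k, 0) for k, d in names}
--                           for t in unique_words}
--     word_emotion_types = {d: {t: counts[t].get(k, 0) for t in unique_words}
--                           for k, d in names}
--     return word_type_emotions, word_emotion_types
-- ===== Notes on version B (the rewrite author's own statement) =====
-- stated objective: simpler
-- what changed: Replaces A's four mutating dict passes (zero-init of both cross dicts, in-place increments, rename-via-pop of every key, final delete of 'Unclassified') by one counting pass over the words plus direct dense builds of both cross dicts over the surviving display names.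
import Mathlib
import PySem

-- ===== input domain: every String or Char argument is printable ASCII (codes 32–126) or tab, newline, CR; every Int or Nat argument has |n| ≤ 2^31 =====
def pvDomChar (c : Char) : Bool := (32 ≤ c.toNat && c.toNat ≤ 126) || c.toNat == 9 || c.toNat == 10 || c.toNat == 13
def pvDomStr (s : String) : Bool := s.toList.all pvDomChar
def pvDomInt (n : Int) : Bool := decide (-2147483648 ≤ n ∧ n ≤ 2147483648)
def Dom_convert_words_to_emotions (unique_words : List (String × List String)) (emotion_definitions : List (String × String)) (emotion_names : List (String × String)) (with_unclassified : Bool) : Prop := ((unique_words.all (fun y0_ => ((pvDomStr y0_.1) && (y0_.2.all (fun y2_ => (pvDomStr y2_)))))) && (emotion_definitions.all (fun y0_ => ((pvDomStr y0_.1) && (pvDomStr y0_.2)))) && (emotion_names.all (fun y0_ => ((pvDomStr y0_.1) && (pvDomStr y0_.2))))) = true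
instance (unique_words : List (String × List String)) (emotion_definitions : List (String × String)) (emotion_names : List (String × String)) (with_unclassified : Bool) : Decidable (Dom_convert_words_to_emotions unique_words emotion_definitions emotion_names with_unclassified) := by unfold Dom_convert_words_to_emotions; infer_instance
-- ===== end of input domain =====

-- B replaces A's four mutating dict passes (zero-init, in-place increments, rename-via-pop,
-- delete of 'Unclassified') by one counting pass plus direct builds of both cross dicts
-- over the surviving display names (objective: simpler; same asymptotic cost).


-- ===== PORT A =====
-- A-side helpers: one definition per pass of A's straight-line code, in A's order.

-- pass 1: word_type_emotions[type] = {}; then word_type_emotions[type][key] = 0 for key in emotion_names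
def cweA_init_wte (unique_words : List (String × List String)) (emotion_names : List (String × String)) :
    PySem.Dict String (PySem.Dict String Int) :=
  unique_words.foldl (fun wte p =>
    emotion_names.foldl
      (fun wte q => wte.modify p.1 PySem.Dict.empty (fun d => d.insert q.1 0))
      (wte.insert p.1 PySem.Dict.empty)) PySem.Dict.empty

-- pass 2: word_emotion_types[key] = {}; then word_emotion_types[key][type] = 0 for type in unique_words
def cweA_init_wet (unique_words : List (String × List String)) (emotion_names : List (String × String)) :
    PySem.Dict String (PySem.Dict String Int) :=
  emotion_names.foldl (fun wet q =>
    unique_words.foldl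
      (fun wet p => wet.modify q.1 PySem.Dict.empty (fun d => d.insert p.1 0))
      (wet.insert q.1 PySem.Dict.empty)) PySem.Dict.empty

-- pass 3: count words via emotion_definitions.get(word) into both dicts ('+= 1' on a present key)
def cweA_count (unique_words : List (String × List String)) (emotion_definitions : List (String × String))
    (s : PySem.Dict String (PySem.Dict String Int) × PySem.Dict String (PySem.Dict String Int)) :
    PySem.Dict String (PySem.Dict String Int) × PySem.Dict String (PySem.Dict String Int) :=
  unique_words.foldl (fun s p =>
    (((PySem.Dict.mk unique_words).get? p.1).getD []).foldl (fun s w =>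
      match (PySem.Dict.mk emotion_definitions).get? w with
      | some e =>
          (s.1.modify p.1 PySem.Dict.empty (fun d => d.modify e 0 (· + 1)),
           s.2.modify e PySem.Dict.empty (fun d => d.modify p.1 0 (· + 1)))
      | none => s) s) s

-- pass 4: rename every key to emotion_names[key] via pop-then-reinsert, in both dicts
def cweA_rename (unique_words : List (String × List String)) (emotion_names : List (String × String))
    (s : PySem.Dict String (PySem.Dict String Int) × PySem.Dict String (PySem.Dict String Int)) :
    PySem.Dict String (PySem.Dict String Int) × PySem.Dict String (PySem.Dict String Int) :=
  emotion_names.foldl (fun s q =>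
    (unique_words.foldl (fun wte p =>
        wte.modify p.1 PySem.Dict.empty
          (fun d => (d.erase q.1).insert (((PySem.Dict.mk emotion_names).get? q.1).getD "")
                      ((d.get? q.1).getD 0))) s.1,
     ((s.2).erase q.1).insert (((PySem.Dict.mk emotion_names).get? q.1).getD "")
       (((s.2).get? q.1).getD PySem.Dict.empty))) s

-- pass 5: if not with_unclassified: del the 'Unclassified' entries
def cweA_del (unique_words : List (String × List String)) (with_unclassified : Bool)
    (s : PySem.Dict String (PySem.Dict String Int) × PySem.Dict String (PySem.Dict String Int)) :
    PySem.Dict String (PySem.Dict String Int) × PySem.Dict String (PySem.Dict String Int) :=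
  if !with_unclassified then
    (unique_words.foldl
       (fun wte p => wte.modify p.1 PySem.Dict.empty (fun d => d.erase "Unclassified")) s.1,
     (s.2).erase "Unclassified")
  else s

def convert_words_to_emotions (unique_words : List (String × List String)) (emotion_definitions : List (String × String)) (emotion_names : List (String × String)) (with_unclassified : Bool) : (List (String × List (String × Int))) × (List (String × List (String × Int))) :=
  let s := cweA_del unique_words with_unclassified
    (cweA_rename unique_words emotion_names
      (cweA_count unique_words emotion_definitions
        (cweA_init_wte unique_words emotion_names, cweA_init_wet unique_words emotion_names)))
  ((s.1).items.map (fun p => (p.1, p.2.items)),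
   (s.2).items.map (fun p => (p.1, p.2.items)))

-- ===== PORT B =====
-- B-side helper: the single counting pass of Source B ({t: {e: count}} via dict.get)
def cweB_counts (unique_words : List (String × List String)) (emotion_definitions : List (String × String)) :
    PySem.Dict String (PySem.Dict String Int) :=
  unique_words.foldl (fun cs p =>
    cs.insert p.1 (p.2.foldl (fun c w =>
      match (PySem.Dict.mk emotion_definitions).get? w with
      | some e => c.insert e (c.getD e 0 + 1)
      | none => c) PySem.Dict.empty)) PySem.Dict.empty

def convert_words_to_emotions_alt (unique_words : List (String × List String)) (emotion_definitions : List (String × String)) (emotion_names : List (String × String)) (with_unclassified : Bool) : (List (String × List (String × Int))) × (List (String × List (String × Int))) :=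
  let names := emotion_names.filter (fun q => with_unclassified || q.2 ≠ "Unclassified")
  let counts := cweB_counts unique_words emotion_definitions
  let wte :=
    unique_words.foldl (fun d p =>
      d.insert p.1 (names.foldl (fun c q =>
        c.insert q.2 (((counts.get? p.1).getD PySem.Dict.empty).getD q.1 0)) PySem.Dict.empty))
      PySem.Dict.empty
  let wet :=
    names.foldl (fun d q =>
      d.insert q.2 (unique_words.foldl (fun c p =>
        c.insert p.1 (((counts.get? p.1).getD PySem.Dict.empty).getD q.1 0)) PySem.Dict.empty))
      PySem.Dict.empty
  (wte.items.map (fun p => (p.1, p.2.items)),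
   wet.items.map (fun p => (p.1, p.2.items)))

-- ===== PRECONDITION & SPEC =====
-- Pre_ excludes: (a) inputs where Python A raises a KeyError — a counted emotion key that is
-- missing from emotion_names, or (when not with_unclassified) no display name 'Unclassified';
-- (b) association lists with duplicate keys, which no Python dict argument can carry; and
-- (c) inputs where a display value of emotion_names equals one of its strictly later keys,
-- on which A's pop-reinsert rename chain clobbers that later entry's count — an accident of
-- A's implementation (a display equal to an earlier or its own key is harmless and admitted).
def Pre_convert_words_to_emotions (unique_words : List (String × List String)) (emotion_definitions : List (String × String)) (emotion_names : List (String × String)) (with_unclassified : Bool) : Prop :=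
  (unique_words.map Prod.fst).Nodup ∧
  (emotion_definitions.map Prod.fst).Nodup ∧
  (emotion_names.map Prod.fst).Nodup ∧
  List.Pairwise (fun a b => a.2 ≠ b.1) emotion_names ∧
  (∀ p ∈ unique_words, ∀ w ∈ p.2, ∀ e, (PySem.Dict.mk emotion_definitions).get? w = some e →
      e ∈ emotion_names.map Prod.fst) ∧
  (with_unclassified = false → "Unclassified" ∈ emotion_names.map Prod.snd)
instance (unique_words : List (String × List String)) (emotion_definitions : List (String × String)) (emotion_names : List (String × String)) (with_unclassified : Bool) : Decidable (Pre_convert_words_to_emotions unique_words emotion_definitions emotion_names with_unclassified) := by unfold Pre_convert_words_to_emotions; infer_instance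

def pvWitness_convert_words_to_emotions : (List (String × List String)) × (List (String × String)) × (List (String × String)) × Bool :=
  ([("n", ["a", "b"]), ("v", ["a"])], [("a", "k1"), ("b", "k2")], [("k1", "Joy"), ("k2", "Unclassified")], false)

def Spec_convert_words_to_emotions (unique_words : List (String × List String)) (emotion_definitions : List (String × String)) (emotion_names : List (String × String)) (with_unclassified : Bool) (out : (List (String × List (String × Int))) × (List (String × List (String × Int)))) : Prop := out = convert_words_to_emotions_alt unique_words emotion_definitions emotion_names with_unclassified
instance (unique_words : List (String × List String)) (emotion_definitions : List (String × String)) (emotion_names : List (String × String)) (with_unclassified : Bool) (out : (List (String × List (String × Int))) × (List (String × List (String × Int)))) : Decidable (Spec_convert_words_to_emotions unique_words emotion_definitions emotion_names with_unclassified out) := by unfold Spec_convert_words_to_emotions; infer_instance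

-- ===== CLAIM (what is proved, stated in full; the proofs are below) =====
def Claim_equal_convert_words_to_emotions : Prop := ∀ (unique_words : List (String × List String)) (emotion_definitions : List (String × String)) (emotion_names : List (String × String)) (with_unclassified : Bool), Dom_convert_words_to_emotions unique_words emotion_definitions emotion_names with_unclassified → Pre_convert_words_to_emotions unique_words emotion_definitions emotion_names with_unclassified → Spec_convert_words_to_emotions unique_words emotion_definitions emotion_names with_unclassified (convert_words_to_emotions unique_words emotion_definitions emotion_names with_unclassified)

-- ===== LEMMAS AND PROOFS =====

-- the list of emotion keys hit by the words ws (in order, with multiplicity)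
def pvE (emotion_definitions : List (String × String)) (ws : List String) : List String :=
  ws.filterMap (fun w => (PySem.Dict.mk emotion_definitions).get? w)

-- the count A and B agree on: how often words of ws map to emotion key k
def pvCnt (emotion_definitions : List (String × String)) (ws : List String) (k : String) : Int :=
  ((pvE emotion_definitions ws).count k : Int)

-- generic loop-shape lemmas --------------------------------------------------

theorem pv_foldl_pair {α σ τ : Type} (l : List α) (f : σ × τ → α → σ × τ)
    (f1 : σ → α → σ) (f2 : τ → α → τ)
    (h : ∀ s x, f s x = (f1 s.1 x, f2 s.2 x)) (a : σ) (b : τ) :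
    l.foldl f (a, b) = (l.foldl f1 a, l.foldl f2 b) := by
  induction l generalizing a b with
  | nil => rfl
  | cons x t ih => rw [List.foldl_cons, List.foldl_cons, List.foldl_cons, h (a, b) x, ih]

theorem pv_foldl_filterMap {α β σ : Type} (l : List α) (g : α → Option β)
    (F : σ → β → σ) (s : σ) :
    l.foldl (fun s x => (g x).elim s (F s)) s
      = (l.filterMap g).foldl F s := by
  induction l generalizing s with
  | nil => rfl
  | cons x t ih => cases hx : g x <;> simp [hx, ih]

theorem pv_foldl_flatMap {α β σ : Type} (l : List α) (f : α → List β)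
    (g : σ → β → σ) (s : σ) :
    l.foldl (fun s x => (f x).foldl g s) s = (l.flatMap f).foldl g s := by
  induction l generalizing s with
  | nil => rfl
  | cons x t ih => simp [List.flatMap_cons, List.foldl_append, ih]

-- dict-level lemmas ----------------------------------------------------------

theorem pv_foldl_modify_insert {κ ν α : Type} [BEq κ] [LawfulBEq κ]
    (l : List α) (w : PySem.Dict κ ν) (t : κ) (d0 : ν) (g : α → ν → ν) (v : ν) :
    l.foldl (fun w x => w.modify t d0 (g x)) (w.insert t v)
      = w.insert t (l.foldl (fun v x => g x v) v) := by
  induction l generalizing v with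
  | nil => rfl
  | cons x r ih =>
    have h : (w.insert t v).modify t d0 (g x) = w.insert t (g x v) := by
      show ((w.insert t v).insert t (g x ((w.insert t v).getD t d0))) = _
      rw [PySem.Dict.getD_insert_self, PySem.Dict.insert_insert_self]
    rw [List.foldl_cons, h, ih, List.foldl_cons]

theorem pv_foldl_modify_events {κ ν ε : Type} [BEq κ] [LawfulBEq κ]
    (evl : List ε) (key : ε → κ) (g : ε → ν → ν) (d0 : ν)
    (base : List (κ × ν)) (hnd : (base.map Prod.fst).Nodup)
    (hmem : ∀ ev ∈ evl, key ev ∈ base.map Prod.fst) :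
    evl.foldl (fun w ev => w.modify (key ev) d0 (g ev)) (PySem.Dict.mk base)
      = PySem.Dict.mk (base.map (fun q =>
          (q.1, (evl.filter (fun ev => key ev == q.1)).foldl (fun v ev => g ev v) q.2))) := by
  induction evl generalizing base with
  | nil => simp
  | cons ev r ih =>
    obtain ⟨q0, hq0, hq0k⟩ := List.mem_map.mp (hmem ev (by exact List.mem_cons_self ..))
    have hinj := List.inj_on_of_nodup_map hnd
    have hc : (PySem.Dict.mk base).contains (key ev) = true := by
      apply (PySem.Dict.contains_iff_mem_keys _ _).mpr
      rw [PySem.Dict.keys_mk]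
      exact hq0k ▸ List.mem_map.mpr ⟨q0, hq0, rfl⟩
    have hgetD : (PySem.Dict.mk base).getD (key ev) d0 = q0.2 := by
      apply PySem.Dict.getD_of_mem_items
      · rw [← hq0k]
        exact hq0
      · rw [PySem.Dict.keys_mk]; exact hnd
    have hstep : (PySem.Dict.mk base).modify (key ev) d0 (g ev)
        = PySem.Dict.mk (base.map (fun p => if p.1 == key ev then (p.1, g ev p.2) else p)) := by
      show (PySem.Dict.mk base).insert (key ev) (g ev ((PySem.Dict.mk base).getD (key ev) d0)) = _
      rw [hgetD]
      apply PySem.Dict.ext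
      rw [PySem.Dict.items_insert_of_contains _ _ hc]
      apply List.map_congr_left
      intro p hp
      by_cases hpk : (p.1 == key ev) = true
      · have hpk' : p.1 = key ev := by simpa using hpk
        have hpq : p = q0 := hinj hp hq0 (by rw [hpk', hq0k])
        simp [hpk', ← hpq]
      · simp [hpk]
    have hmapfst : (base.map (fun p => if p.1 == key ev then (p.1, g ev p.2) else p)).map Prod.fst
        = base.map Prod.fst := by
      rw [List.map_map]; apply List.map_congr_left; intro p hp
      by_cases hpk : (p.1 == key ev) = true <;> simp [hpk]
    simp only [List.foldl_cons]
    rw [hstep, ih _ (by rw [hmapfst]; exact hnd)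
      (fun ev' hev' => by rw [hmapfst]; exact hmem ev' (List.mem_cons_of_mem _ hev'))]
    apply PySem.Dict.ext
    show List.map _ _ = List.map _ _
    rw [List.map_map]
    apply List.map_congr_left
    intro p hp
    by_cases hpk : (p.1 == key ev) = true
    · have hpk' : p.1 = key ev := by simpa using hpk
      have hfil : (List.filter (fun ev' => key ev' == p.1) (ev :: r))
          = ev :: List.filter (fun ev' => key ev' == p.1) r := by
        rw [List.filter_cons_of_pos (by simp [hpk'])]
      simp [hpk, hfil]
    · have hpk' : ¬ p.1 = key ev := by simpa using hpk
      have hfil : (List.filter (fun ev' => key ev' == p.1) (ev :: r))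
          = List.filter (fun ev' => key ev' == p.1) r := by
        rw [List.filter_cons_of_neg (by simp; exact fun e => hpk' e.symm)]
      simp [hpk, hfil]

theorem pv_foldl_add_one {α : Type} (l : List α) (s : Int) :
    l.foldl (fun v _ => v + 1) s = s + l.length := by
  induction l generalizing s with
  | nil => simp
  | cons x t ih => rw [List.foldl_cons, ih]; simp; omega

theorem pv_count_fold {κ : Type} [BEq κ] [LawfulBEq κ]
    (l : List κ) (base : List (κ × Int)) (hnd : (base.map Prod.fst).Nodup)
    (hmem : ∀ e ∈ l, e ∈ base.map Prod.fst) :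
    l.foldl (fun c e => c.modify e 0 (· + 1)) (PySem.Dict.mk base)
      = PySem.Dict.mk (base.map (fun q => (q.1, q.2 + (l.count q.1 : Int)))) := by
  have h := pv_foldl_modify_events l (fun e => e) (fun _ v => v + 1) 0 base hnd hmem
  refine Eq.trans h ?_
  apply PySem.Dict.ext
  show List.map _ _ = List.map _ _
  apply List.map_congr_left
  intro q _
  rw [pv_foldl_add_one]
  have hlen : (l.filter (fun ev => ev == q.1)).length = l.count q.1 := by
    rw [← List.countP_eq_length_filter, ← List.count_eq_countP]
  rw [hlen]

theorem pv_insert_append {κ ν : Type} [BEq κ] [LawfulBEq κ]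
    (xs : List (κ × ν)) (d : PySem.Dict κ ν) (k : κ) (v : ν)
    (hx : ∀ p ∈ xs, p.1 ≠ k) :
    (PySem.Dict.mk (xs ++ d.items)).insert k v
      = PySem.Dict.mk (xs ++ (d.insert k v).items) := by
  have hxk : ∀ p ∈ xs, (p.1 == k) = false := fun p hp => by simpa using hx p hp
  have hcc : (PySem.Dict.mk (xs ++ d.items)).contains k = d.contains k := by
    show (xs ++ d.items).any _ = _
    rw [List.any_append]
    have hxa : xs.any (fun p => p.1 == k) = false :=
      List.any_eq_false.mpr (fun p hp => by simp [hxk p hp])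
    rw [hxa, Bool.false_or]
    rfl
  by_cases hc : d.contains k = true
  · apply PySem.Dict.ext
    rw [PySem.Dict.items_insert_of_contains _ v (by rw [hcc]; exact hc),
      PySem.Dict.items_insert_of_contains _ v hc]
    show List.map _ (xs ++ d.items) = xs ++ List.map _ d.items
    rw [List.map_append]
    congr 1
    exact (List.map_congr_left (fun p hp => by simp [hxk p hp])).trans (List.map_id' _)
  · have hc2 : d.contains k = false := by simpa using hc
    apply PySem.Dict.ext
    rw [PySem.Dict.items_insert_of_not_contains _ v (by rw [hcc]; exact hc2),
      PySem.Dict.items_insert_of_not_contains _ v hc2]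
    show (xs ++ d.items) ++ [(k, v)] = xs ++ (d.items ++ [(k, v)])
    rw [List.append_assoc]

theorem pv_rename_fold {κ ν : Type} [BEq κ] [LawfulBEq κ] (d0 : ν)
    (l : List (κ × κ)) (c : (κ × κ) → ν) (acc : PySem.Dict κ ν)
    (hnd : (l.map Prod.fst).Nodup)
    (hpair : l.Pairwise (fun a b => a.2 ≠ b.1))
    (hacc : ∀ q ∈ l, acc.contains q.1 = false) :
    l.foldl (fun d q => (d.erase q.1).insert q.2 ((d.get? q.1).getD d0))
        (PySem.Dict.mk (l.map (fun q => (q.1, c q)) ++ acc.items))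
      = l.foldl (fun d q => d.insert q.2 (c q)) acc := by
  induction l generalizing acc with
  | nil => simp
  | cons q r ih =>
    rw [List.map_cons] at hnd
    obtain ⟨hq1, hndr⟩ := List.nodup_cons.mp hnd
    obtain ⟨hhead, hpr⟩ := List.pairwise_cons.mp hpair
    simp only [List.map_cons, List.cons_append, List.foldl_cons]
    have hgetq : (PySem.Dict.mk ((q.1, c q) :: (r.map (fun q' => (q'.1, c q')) ++ acc.items))).get? q.1
        = some (c q) := by
      show Option.map _ (List.find? _ _) = _
      rw [List.find?_cons_of_pos (by simp)]
      rfl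
    have hnotacc : ∀ p ∈ acc.items, (p.1 == q.1) = false := by
      intro p hp
      have hall := List.any_eq_false.mp (hacc q (List.mem_cons_self ..))
      simpa using hall p hp
    have herase : (PySem.Dict.mk ((q.1, c q) :: (r.map (fun q' => (q'.1, c q')) ++ acc.items))).erase q.1
        = PySem.Dict.mk (r.map (fun q' => (q'.1, c q')) ++ acc.items) := by
      apply PySem.Dict.ext
      show List.filter _ _ = _
      rw [List.filter_cons_of_neg (by simp)]
      apply List.filter_eq_self.mpr
      intro p hp
      rcases List.mem_append.mp hp with hp1 | hp2
      · obtain ⟨q', hq', rfl⟩ := List.mem_map.mp hp1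
        have hne : q'.1 ≠ q.1 := fun e => hq1 (e ▸ List.mem_map.mpr ⟨q', hq', rfl⟩)
        simpa using hne
      · simp [hnotacc p hp2]
    rw [hgetq, herase, Option.getD_some,
      pv_insert_append (r.map (fun q' => (q'.1, c q'))) acc q.2 (c q)
        (by
          intro p hp
          obtain ⟨q', hq', rfl⟩ := List.mem_map.mp hp
          exact (hhead q' hq').symm)]
    exact ih (acc.insert q.2 (c q)) hndr hpr
      (fun a ha => by
        rw [PySem.Dict.contains_insert]
        have hne : (a.1 == q.2) = false := by
          simp
          exact fun e => (hhead a ha) e.symm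
        rw [hne, Bool.false_or]
        exact hacc a (List.mem_cons_of_mem _ ha))

theorem pv_erase_insert_self {κ ν : Type} [BEq κ] [LawfulBEq κ]
    (d : PySem.Dict κ ν) (k : κ) (v : ν) :
    (d.insert k v).erase k = d.erase k := by
  by_cases hc : d.contains k = true
  · apply PySem.Dict.ext
    show List.filter _ (d.insert k v).items = List.filter _ d.items
    rw [PySem.Dict.items_insert_of_contains d v hc, List.filter_map]
    have h1 : List.filter ((fun p => !(p.1 == k)) ∘ fun p => if (p.1 == k) = true then (k, v) else p) d.items
        = List.filter (fun p : κ × ν => !(p.1 == k)) d.items := by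
      apply List.filter_congr
      intro p _
      by_cases hpk : (p.1 == k) = true <;> simp [Function.comp, hpk]
    rw [h1]
    refine (List.map_congr_left (fun p hp => ?_)).trans (List.map_id' _)
    have := (List.mem_filter.mp hp).2
    simp at this
    simp [this]
  · have hc2 : d.contains k = false := by simpa using hc
    apply PySem.Dict.ext
    show List.filter _ (d.insert k v).items = List.filter _ d.items
    rw [PySem.Dict.items_insert_of_not_contains d v hc2, List.filter_append]
    simp

theorem pv_erase_insert_comm {κ ν : Type} [BEq κ] [LawfulBEq κ]
    (d : PySem.Dict κ ν) (k u : κ) (v : ν) (h : k ≠ u) :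
    (d.insert k v).erase u = (d.erase u).insert k v := by
  by_cases hc : d.contains k = true
  · have hc' : (d.erase u).contains k = true := by
      obtain ⟨p, hp, hpk⟩ := List.any_eq_true.mp hc
      have hpk' : p.1 = k := by simpa using hpk
      show List.any _ _ = true
      apply List.any_eq_true.mpr
      exact ⟨p, List.mem_filter.mpr ⟨hp, by simp [hpk', h]⟩, hpk⟩
    apply PySem.Dict.ext
    show ((d.insert k v).erase u).items = ((d.erase u).insert k v).items
    rw [PySem.Dict.items_insert_of_contains _ v hc']
    show List.filter _ (d.insert k v).items = List.map _ (List.filter _ d.items)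
    rw [PySem.Dict.items_insert_of_contains _ v hc, List.filter_map]
    congr 1
    apply List.filter_congr
    intro p _
    by_cases hpk : (p.1 == k) = true
    · have hpk' : p.1 = k := by simpa using hpk
      simp [Function.comp, hpk']
    · simp [Function.comp, hpk]
  · have hc2 : d.contains k = false := by simpa using hc
    have hall := List.any_eq_false.mp hc2
    have hc2' : (d.erase u).contains k = false := by
      show List.any _ _ = false
      apply List.any_eq_false.mpr
      intro p hp
      exact hall p (List.mem_filter.mp hp).1
    apply PySem.Dict.ext
    show ((d.insert k v).erase u).items = ((d.erase u).insert k v).items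
    rw [PySem.Dict.items_insert_of_not_contains _ v hc2']
    show List.filter _ (d.insert k v).items = List.filter _ d.items ++ [(k, v)]
    rw [PySem.Dict.items_insert_of_not_contains _ v hc2, List.filter_append]
    simp [h]

theorem pv_erase_foldl_insert {κ ν : Type} [BEq κ] [LawfulBEq κ]
    (l : List (κ × κ)) (v : (κ × κ) → ν) (acc : PySem.Dict κ ν) (u : κ) :
    (l.foldl (fun d q => d.insert q.2 (v q)) acc).erase u
      = (l.filter (fun q => !(q.2 == u))).foldl (fun d q => d.insert q.2 (v q)) (acc.erase u) := by
  induction l generalizing acc with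
  | nil => rfl
  | cons q r ih =>
    rw [List.foldl_cons, List.filter_cons]
    by_cases hq : q.2 = u
    · subst hq
      have hb : (!(q.2 == q.2)) = false := by simp
      rw [hb, if_neg (by simp), ih, pv_erase_insert_self]
    · have hb : (!(q.2 == u)) = true := by simp [hq]
      rw [hb, if_pos rfl, ih, pv_erase_insert_comm _ _ _ _ hq, List.foldl_cons]

-- list bookkeeping -----------------------------------------------------------

theorem pv_filter_key_singleton (uw : List (String × List String))
    (h : (uw.map Prod.fst).Nodup) (p : String × List String) (hp : p ∈ uw) :
    uw.filter (fun p' => p'.1 == p.1) = [p] := by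
  induction uw with
  | nil => cases hp
  | cons p' rest ih =>
    rw [List.map_cons] at h
    obtain ⟨hh, ht⟩ := List.nodup_cons.mp h
    rcases List.mem_cons.mp hp with rfl | hp2
    · rw [List.filter_cons_of_pos (by simp)]
      have hnil : List.filter (fun p'' => p''.1 == p.1) rest = [] := by
        apply List.filter_eq_nil_iff.mpr
        intro a ha hk
        have hk' : a.1 = p.1 := by simpa using hk
        exact hh (hk' ▸ List.mem_map.mpr ⟨a, ha, rfl⟩)
      rw [hnil]
    · have hne : p'.1 ≠ p.1 := fun e => hh (e ▸ List.mem_map.mpr ⟨p, hp2, rfl⟩)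
      rw [List.filter_cons_of_neg (by simpa using hne)]
      exact ih ht hp2

theorem pv_blockfilter_nil (uw : List (String × List String)) (E : (String × List String) → List String)
    (t : String) (h : t ∉ uw.map Prod.fst) :
    (uw.flatMap (fun p' => (E p').map (fun e => (p', e)))).filter (fun ev => ev.1.1 == t) = [] := by
  induction uw with
  | nil => rfl
  | cons p' rest ih =>
    rw [List.map_cons] at h
    have hne : p'.1 ≠ t := fun e => h (e ▸ List.mem_cons_self ..)
    have hrest : t ∉ rest.map Prod.fst := fun hm => h (List.mem_cons_of_mem _ hm)
    rw [List.flatMap_cons, List.filter_append, ih hrest, List.append_nil]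
    apply List.filter_eq_nil_iff.mpr
    intro a ha
    obtain ⟨e, _, rfl⟩ := List.mem_map.mp ha
    simpa using hne

theorem pv_blockfilter_fst (uw : List (String × List String)) (E : (String × List String) → List String)
    (h1 : (uw.map Prod.fst).Nodup) (p : String × List String) (hp : p ∈ uw) :
    (uw.flatMap (fun p' => (E p').map (fun e => (p', e)))).filter (fun ev => ev.1.1 == p.1)
      = (E p).map (fun e => (p, e)) := by
  induction uw with
  | nil => cases hp
  | cons p' rest ih =>
    rw [List.map_cons] at h1
    obtain ⟨hh, ht⟩ := List.nodup_cons.mp h1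
    rw [List.flatMap_cons, List.filter_append]
    rcases List.mem_cons.mp hp with rfl | hp2
    · have hblock : ((E p).map (fun e => (p, e))).filter (fun ev => ev.1.1 == p.1)
          = (E p).map (fun e => (p, e)) := by
        apply List.filter_eq_self.mpr
        intro a ha
        obtain ⟨e, _, rfl⟩ := List.mem_map.mp ha
        simp
      rw [hblock, pv_blockfilter_nil rest E p.1 hh, List.append_nil]
    · have hne : p'.1 ≠ p.1 := fun e => hh (e ▸ List.mem_map.mpr ⟨p, hp2, rfl⟩)
      have hblock : ((E p').map (fun e => (p', e))).filter (fun ev => ev.1.1 == p.1) = [] := by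
        apply List.filter_eq_nil_iff.mpr
        intro a ha
        obtain ⟨e, _, rfl⟩ := List.mem_map.mp ha
        simpa using hne
      rw [hblock, List.nil_append]
      exact ih ht hp2

theorem pv_events_count_zero (uw : List (String × List String)) (E : (String × List String) → List String)
    (t k : String) (h : t ∉ uw.map Prod.fst) :
    (((uw.flatMap (fun p' => (E p').map (fun e => (p', e)))).filter (fun ev => ev.2 == k)).map
        (fun ev => ev.1.1)).count t = 0 := by
  rw [List.count_eq_zero]
  intro hm
  obtain ⟨ev, hev, hevt⟩ := List.mem_map.mp hm
  obtain ⟨p', hp', he⟩ := List.mem_flatMap.mp (List.mem_filter.mp hev).1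
  obtain ⟨e, _, rfl⟩ := List.mem_map.mp he
  exact h (hevt ▸ List.mem_map.mpr ⟨p', hp', rfl⟩)

theorem pv_events_count (uw : List (String × List String)) (E : (String × List String) → List String)
    (h1 : (uw.map Prod.fst).Nodup) (p : String × List String) (hp : p ∈ uw) (k : String) :
    (((uw.flatMap (fun p' => (E p').map (fun e => (p', e)))).filter (fun ev => ev.2 == k)).map
        (fun ev => ev.1.1)).count p.1
      = (E p).count k := by
  induction uw with
  | nil => cases hp
  | cons p' rest ih =>
    rw [List.map_cons] at h1
    obtain ⟨hh, ht⟩ := List.nodup_cons.mp h1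
    rw [List.flatMap_cons, List.filter_append, List.map_append, List.count_append]
    have hblock : (((E p').map (fun e => (p', e))).filter (fun ev => ev.2 == k)).map (fun ev => ev.1.1)
        = List.replicate ((E p').count k) p'.1 := by
      rw [List.filter_map, List.map_map]
      have h1' : ((fun ev : (String × List String) × String => ev.2 == k) ∘ (fun e => (p', e)))
          = (fun e => e == k) := rfl
      have h2' : ((fun ev : (String × List String) × String => ev.1.1) ∘ (fun e => (p', e)))
          = (Function.const String p'.1) := rfl
      rw [h1', h2', List.map_const, ← List.countP_eq_length_filter, ← List.count_eq_countP]
    rcases List.mem_cons.mp hp with rfl | hp2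
    · rw [hblock, List.count_replicate, if_pos (by simp), pv_events_count_zero rest E p.1 k hh,
        Nat.add_zero]
    · have hne : p'.1 ≠ p.1 := fun e => hh (e ▸ List.mem_map.mpr ⟨p, hp2, rfl⟩)
      rw [hblock, List.count_replicate, if_neg (by simpa using hne), Nat.zero_add]
      exact ih ht hp2

-- characterizations of the two ports -----------------------------------------

theorem pv_fresh_fold {ν α : Type} (l : List α) (k : α → String) (v : α → ν)
    (hnd : (l.map k).Nodup) :
    l.foldl (fun d a => d.insert (k a) (v a)) PySem.Dict.empty
      = PySem.Dict.mk (l.map (fun a => (k a, v a))) := by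
  apply PySem.Dict.ext
  have h := PySem.Dict.items_foldl_insert_fresh l k v PySem.Dict.empty
    (fun a _ => PySem.Dict.contains_empty (k a)) hnd
  exact h.trans (List.nil_append _)

theorem pv_modify_events_map {ν ε α : Type} (evl : List ε) (key : ε → String) (g : ε → ν → ν)
    (d0 : ν) (src : List α) (ka : α → String) (va : α → ν)
    (hnd : (src.map ka).Nodup) (hmem : ∀ ev ∈ evl, key ev ∈ src.map ka) :
    evl.foldl (fun w ev => w.modify (key ev) d0 (g ev))
        (PySem.Dict.mk (src.map (fun a => (ka a, va a))))
      = PySem.Dict.mk (src.map (fun a =>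
          (ka a, (evl.filter (fun ev => key ev == ka a)).foldl (fun v ev => g ev v) (va a)))) := by
  refine Eq.trans (pv_foldl_modify_events evl key g d0 (src.map (fun a => (ka a, va a)))
    (by rw [List.map_map]; exact hnd)
    (by intro ev hev; rw [List.map_map]; exact hmem ev hev)) ?_
  apply PySem.Dict.ext
  show List.map _ _ = _
  rw [List.map_map]
  rfl

theorem pv_count_fold_map {α : Type} (l : List String) (src : List α)
    (ka : α → String) (va : α → Int)
    (hnd : (src.map ka).Nodup) (hmem : ∀ e ∈ l, e ∈ src.map ka) :
    l.foldl (fun c e => c.modify e 0 (· + 1))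
        (PySem.Dict.mk (src.map (fun a => (ka a, va a))))
      = PySem.Dict.mk (src.map (fun a => (ka a, va a + (l.count (ka a) : Int)))) := by
  refine Eq.trans (pv_count_fold l (src.map (fun a => (ka a, va a)))
    (by rw [List.map_map]; exact hnd)
    (by intro e he; rw [List.map_map]; exact hmem e he)) ?_
  apply PySem.Dict.ext
  show List.map _ _ = _
  rw [List.map_map]
  rfl

theorem pv_initA_wte (uw : List (String × List String)) (ens : List (String × String))
    (h1 : (uw.map Prod.fst).Nodup) (h3 : (ens.map Prod.fst).Nodup) :
    cweA_init_wte uw ens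
      = PySem.Dict.mk (uw.map (fun p => (p.1,
          PySem.Dict.mk (ens.map (fun q => (q.1, (0:Int))))))) := by
  unfold cweA_init_wte
  have hbody : ∀ (w : PySem.Dict String (PySem.Dict String Int)), ∀ p ∈ uw,
      ens.foldl (fun w q => w.modify p.1 PySem.Dict.empty (fun d => d.insert q.1 0))
          (w.insert p.1 PySem.Dict.empty)
        = w.insert p.1 (PySem.Dict.mk (ens.map (fun q => (q.1, (0:Int))))) := by
    intro w p _
    refine Eq.trans (pv_foldl_modify_insert ens w p.1 PySem.Dict.empty
      (fun q d => d.insert q.1 0) PySem.Dict.empty) ?_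
    exact congrArg (w.insert p.1) (pv_fresh_fold ens (fun q => q.1) (fun _ => (0:Int)) h3)
  refine Eq.trans (PySem.List.foldl_congr_mem uw _
    (fun w p => w.insert p.1 (PySem.Dict.mk (ens.map (fun q => (q.1, (0:Int))))))
    PySem.Dict.empty hbody) ?_
  exact pv_fresh_fold uw (fun p => p.1) _ h1

theorem pv_initA_wet (uw : List (String × List String)) (ens : List (String × String))
    (h1 : (uw.map Prod.fst).Nodup) (h3 : (ens.map Prod.fst).Nodup) :
    cweA_init_wet uw ens
      = PySem.Dict.mk (ens.map (fun q => (q.1,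
          PySem.Dict.mk (uw.map (fun p => (p.1, (0:Int))))))) := by
  unfold cweA_init_wet
  have hbody : ∀ (w : PySem.Dict String (PySem.Dict String Int)), ∀ q ∈ ens,
      uw.foldl (fun w p => w.modify q.1 PySem.Dict.empty (fun d => d.insert p.1 0))
          (w.insert q.1 PySem.Dict.empty)
        = w.insert q.1 (PySem.Dict.mk (uw.map (fun p => (p.1, (0:Int))))) := by
    intro w q _
    refine Eq.trans (pv_foldl_modify_insert uw w q.1 PySem.Dict.empty
      (fun p d => d.insert p.1 0) PySem.Dict.empty) ?_
    exact congrArg (w.insert q.1) (pv_fresh_fold uw (fun p => p.1) (fun _ => (0:Int)) h1)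
  refine Eq.trans (PySem.List.foldl_congr_mem ens _
    (fun w q => w.insert q.1 (PySem.Dict.mk (uw.map (fun p => (p.1, (0:Int))))))
    PySem.Dict.empty hbody) ?_
  exact pv_fresh_fold ens (fun q => q.1) _ h3

theorem pv_countA_wte (uw : List (String × List String)) (eds ens : List (String × String))
    (h1 : (uw.map Prod.fst).Nodup) (h3 : (ens.map Prod.fst).Nodup)
    (h5 : ∀ p ∈ uw, ∀ e ∈ pvE eds p.2, e ∈ ens.map Prod.fst) :
    uw.foldl (fun w p => (((PySem.Dict.mk uw).get? p.1).getD []).foldl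
        (fun w x => match (PySem.Dict.mk eds).get? x with
          | some e => w.modify p.1 PySem.Dict.empty (fun d => d.modify e 0 (· + 1))
          | none => w) w)
      (PySem.Dict.mk (uw.map (fun p => (p.1, PySem.Dict.mk (ens.map (fun q => (q.1, (0:Int))))))))
    = PySem.Dict.mk (uw.map (fun p => (p.1,
        PySem.Dict.mk (ens.map (fun q => (q.1, pvCnt eds p.2 q.1)))))) := by
  have hlk : ∀ p ∈ uw, ((PySem.Dict.mk uw).get? p.1).getD [] = p.2 := by
    intro p hp
    rw [PySem.Dict.get?_of_mem_items (PySem.Dict.mk uw) (show (p.1, p.2) ∈ uw from hp)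
      (by rw [PySem.Dict.keys_mk]; exact h1)]
    rfl
  have hbody : ∀ (w : PySem.Dict String (PySem.Dict String Int)), ∀ p ∈ uw,
      (((PySem.Dict.mk uw).get? p.1).getD []).foldl
        (fun w x => match (PySem.Dict.mk eds).get? x with
          | some e => w.modify p.1 PySem.Dict.empty (fun d => d.modify e 0 (· + 1))
          | none => w) w
      = ((pvE eds p.2).map (fun e => (p, e))).foldl
          (fun w ev => w.modify ev.1.1 PySem.Dict.empty (fun d => d.modify ev.2 0 (· + 1))) w := by
    intro w p hp
    rw [hlk p hp]
    refine Eq.trans (PySem.List.foldl_congr_mem p.2 _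
      (fun (w : PySem.Dict String (PySem.Dict String Int)) x => ((PySem.Dict.mk eds).get? x).elim w
        (fun e => w.modify p.1 PySem.Dict.empty (fun d => d.modify e 0 (· + 1)))) w ?_) ?_
    · intro w' x _
      cases hx : (PySem.Dict.mk eds).get? x <;> simp only [hx, Option.elim_none, Option.elim_some]
    refine Eq.trans (pv_foldl_filterMap p.2 (fun x => (PySem.Dict.mk eds).get? x)
      (fun (w : PySem.Dict String (PySem.Dict String Int)) e => w.modify p.1 PySem.Dict.empty (fun d => d.modify e 0 (· + 1))) w) ?_
    exact (List.foldl_map (f := fun e => (p, e))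
      (g := fun (w : PySem.Dict String (PySem.Dict String Int)) ev => w.modify ev.1.1 PySem.Dict.empty
        (fun d => d.modify ev.2 0 (· + 1)))).symm
  refine Eq.trans (PySem.List.foldl_congr_mem uw _
    (fun (w : PySem.Dict String (PySem.Dict String Int)) p => ((pvE eds p.2).map (fun e => (p, e))).foldl
      (fun w ev => w.modify ev.1.1 PySem.Dict.empty (fun d => d.modify ev.2 0 (· + 1))) w)
    _ hbody) ?_
  refine Eq.trans (pv_foldl_flatMap uw (fun p => (pvE eds p.2).map (fun e => (p, e)))
    (fun (w : PySem.Dict String (PySem.Dict String Int)) ev => w.modify ev.1.1 PySem.Dict.empty (fun d => d.modify ev.2 0 (· + 1)))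
    (PySem.Dict.mk (uw.map (fun p => (p.1, PySem.Dict.mk (ens.map (fun q => (q.1, (0:Int))))))))) ?_
  refine Eq.trans (pv_modify_events_map
    (uw.flatMap (fun p => (pvE eds p.2).map (fun e => (p, e))))
    (fun ev => ev.1.1) (fun ev d => d.modify ev.2 0 (· + 1)) PySem.Dict.empty
    uw (fun p => p.1) (fun p => PySem.Dict.mk (ens.map (fun q => (q.1, (0:Int)))))
    h1
    (by
      intro ev hev
      obtain ⟨p', hp', hin⟩ := List.mem_flatMap.mp hev
      obtain ⟨e, _, rfl⟩ := List.mem_map.mp hin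
      exact List.mem_map.mpr ⟨p', hp', rfl⟩)) ?_
  apply PySem.Dict.ext
  show List.map _ _ = List.map _ _
  apply List.map_congr_left
  intro p hp
  refine congrArg (Prod.mk p.1) ?_
  rw [pv_blockfilter_fst uw (fun p' => pvE eds p'.2) h1 p hp]
  refine Eq.trans (List.foldl_map) ?_
  refine Eq.trans (pv_count_fold_map (pvE eds p.2) ens (fun q => q.1) (fun _ => (0:Int))
    h3 (h5 p hp)) ?_
  apply PySem.Dict.ext
  show List.map _ _ = List.map _ _
  apply List.map_congr_left
  intro q _
  refine congrArg (Prod.mk q.1) ?_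
  rw [zero_add]
  rfl

theorem pv_countA_wet (uw : List (String × List String)) (eds ens : List (String × String))
    (h1 : (uw.map Prod.fst).Nodup) (h3 : (ens.map Prod.fst).Nodup)
    (h5 : ∀ p ∈ uw, ∀ e ∈ pvE eds p.2, e ∈ ens.map Prod.fst) :
    uw.foldl (fun w p => (((PySem.Dict.mk uw).get? p.1).getD []).foldl
        (fun w x => match (PySem.Dict.mk eds).get? x with
          | some e => w.modify e PySem.Dict.empty (fun d => d.modify p.1 0 (· + 1))
          | none => w) w)
      (PySem.Dict.mk (ens.map (fun q => (q.1, PySem.Dict.mk (uw.map (fun p => (p.1, (0:Int))))))))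
    = PySem.Dict.mk (ens.map (fun q => (q.1,
        PySem.Dict.mk (uw.map (fun p => (p.1, pvCnt eds p.2 q.1)))))) := by
  have hlk : ∀ p ∈ uw, ((PySem.Dict.mk uw).get? p.1).getD [] = p.2 := by
    intro p hp
    rw [PySem.Dict.get?_of_mem_items (PySem.Dict.mk uw) (show (p.1, p.2) ∈ uw from hp)
      (by rw [PySem.Dict.keys_mk]; exact h1)]
    rfl
  have hbody : ∀ (w : PySem.Dict String (PySem.Dict String Int)), ∀ p ∈ uw,
      (((PySem.Dict.mk uw).get? p.1).getD []).foldl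
        (fun w x => match (PySem.Dict.mk eds).get? x with
          | some e => w.modify e PySem.Dict.empty (fun d => d.modify p.1 0 (· + 1))
          | none => w) w
      = ((pvE eds p.2).map (fun e => (p, e))).foldl
          (fun w ev => w.modify ev.2 PySem.Dict.empty (fun d => d.modify ev.1.1 0 (· + 1))) w := by
    intro w p hp
    rw [hlk p hp]
    refine Eq.trans (PySem.List.foldl_congr_mem p.2 _
      (fun (w : PySem.Dict String (PySem.Dict String Int)) x => ((PySem.Dict.mk eds).get? x).elim w
        (fun e => w.modify e PySem.Dict.empty (fun d => d.modify p.1 0 (· + 1)))) w ?_) ?_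
    · intro w' x _
      cases hx : (PySem.Dict.mk eds).get? x <;> simp only [hx, Option.elim_none, Option.elim_some]
    refine Eq.trans (pv_foldl_filterMap p.2 (fun x => (PySem.Dict.mk eds).get? x)
      (fun (w : PySem.Dict String (PySem.Dict String Int)) e => w.modify e PySem.Dict.empty (fun d => d.modify p.1 0 (· + 1))) w) ?_
    exact (List.foldl_map (f := fun e => (p, e))
      (g := fun (w : PySem.Dict String (PySem.Dict String Int)) ev => w.modify ev.2 PySem.Dict.empty
        (fun d => d.modify ev.1.1 0 (· + 1)))).symm
  refine Eq.trans (PySem.List.foldl_congr_mem uw _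
    (fun (w : PySem.Dict String (PySem.Dict String Int)) p => ((pvE eds p.2).map (fun e => (p, e))).foldl
      (fun w ev => w.modify ev.2 PySem.Dict.empty (fun d => d.modify ev.1.1 0 (· + 1))) w)
    _ hbody) ?_
  refine Eq.trans (pv_foldl_flatMap uw (fun p => (pvE eds p.2).map (fun e => (p, e)))
    (fun (w : PySem.Dict String (PySem.Dict String Int)) ev => w.modify ev.2 PySem.Dict.empty (fun d => d.modify ev.1.1 0 (· + 1)))
    (PySem.Dict.mk (ens.map (fun q => (q.1, PySem.Dict.mk (uw.map (fun p => (p.1, (0:Int))))))))) ?_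
  refine Eq.trans (pv_modify_events_map
    (uw.flatMap (fun p => (pvE eds p.2).map (fun e => (p, e))))
    (fun ev => ev.2) (fun ev d => d.modify ev.1.1 0 (· + 1)) PySem.Dict.empty
    ens (fun q => q.1) (fun q => PySem.Dict.mk (uw.map (fun p => (p.1, (0:Int)))))
    h3
    (by
      intro ev hev
      obtain ⟨p', hp', hin⟩ := List.mem_flatMap.mp hev
      obtain ⟨e, he, rfl⟩ := List.mem_map.mp hin
      exact h5 p' hp' e he)) ?_
  apply PySem.Dict.ext
  show List.map _ _ = List.map _ _
  apply List.map_congr_left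
  intro q hq
  refine congrArg (Prod.mk q.1) ?_
  refine Eq.trans (List.foldl_map (f := fun ev : (String × List String) × String => ev.1.1)
    (g := fun (v : PySem.Dict String Int) t => v.modify t 0 (· + 1))).symm ?_
  refine Eq.trans (pv_count_fold_map
    (((uw.flatMap (fun p => (pvE eds p.2).map (fun e => (p, e)))).filter
        (fun ev => ev.2 == q.1)).map (fun ev => ev.1.1))
    uw (fun p => p.1) (fun _ => (0:Int)) h1
    (by
      intro t ht
      obtain ⟨ev, hev, rfl⟩ := List.mem_map.mp ht
      obtain ⟨p', hp', hin⟩ := List.mem_flatMap.mp (List.mem_filter.mp hev).1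
      obtain ⟨e, _, rfl⟩ := List.mem_map.mp hin
      exact List.mem_map.mpr ⟨p', hp', rfl⟩)) ?_
  apply PySem.Dict.ext
  show List.map _ _ = List.map _ _
  apply List.map_congr_left
  intro p hp
  refine congrArg (Prod.mk p.1) ?_
  rw [zero_add, pv_events_count uw (fun p' => pvE eds p'.2) h1 p hp q.1]
  rfl

theorem pv_countA (uw : List (String × List String)) (eds ens : List (String × String))
    (h1 : (uw.map Prod.fst).Nodup) (h3 : (ens.map Prod.fst).Nodup)
    (h5 : ∀ p ∈ uw, ∀ e ∈ pvE eds p.2, e ∈ ens.map Prod.fst) :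
    cweA_count uw eds
        (PySem.Dict.mk (uw.map (fun p => (p.1, PySem.Dict.mk (ens.map (fun q => (q.1, (0:Int))))))),
         PySem.Dict.mk (ens.map (fun q => (q.1, PySem.Dict.mk (uw.map (fun p => (p.1, (0:Int))))))))
      = (PySem.Dict.mk (uw.map (fun p => (p.1, PySem.Dict.mk (ens.map (fun q => (q.1, pvCnt eds p.2 q.1)))))),
         PySem.Dict.mk (ens.map (fun q => (q.1, PySem.Dict.mk (uw.map (fun p => (p.1, pvCnt eds p.2 q.1))))))) := by
  unfold cweA_count
  refine Eq.trans (pv_foldl_pair uw _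
    (fun (w : PySem.Dict String (PySem.Dict String Int)) p => (((PySem.Dict.mk uw).get? p.1).getD []).foldl
      (fun w x => match (PySem.Dict.mk eds).get? x with
        | some e => w.modify p.1 PySem.Dict.empty (fun d => d.modify e 0 (· + 1))
        | none => w) w)
    (fun (t : PySem.Dict String (PySem.Dict String Int)) p => (((PySem.Dict.mk uw).get? p.1).getD []).foldl
      (fun t x => match (PySem.Dict.mk eds).get? x with
        | some e => t.modify e PySem.Dict.empty (fun d => d.modify p.1 0 (· + 1))
        | none => t) t)
    ?_ _ _) ?_
  · intro s p
    refine Eq.trans (pv_foldl_pair (((PySem.Dict.mk uw).get? p.1).getD []) _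
      (fun (w : PySem.Dict String (PySem.Dict String Int)) x => match (PySem.Dict.mk eds).get? x with
        | some e => w.modify p.1 PySem.Dict.empty (fun d => d.modify e 0 (· + 1))
        | none => w)
      (fun (t : PySem.Dict String (PySem.Dict String Int)) x => match (PySem.Dict.mk eds).get? x with
        | some e => t.modify e PySem.Dict.empty (fun d => d.modify p.1 0 (· + 1))
        | none => t)
      ?_ s.1 s.2) rfl
    intro s' x
    cases hx : (PySem.Dict.mk eds).get? x <;> simp only [hx]
  · exact congrArg₂ Prod.mk (pv_countA_wte uw eds ens h1 h3 h5) (pv_countA_wet uw eds ens h1 h3 h5)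

theorem pv_blockfilter_snd (ens : List (String × String)) (uw : List (String × List String))
    (h1 : (uw.map Prod.fst).Nodup) (p : String × List String) (hp : p ∈ uw) :
    (ens.flatMap (fun q => uw.map (fun p' => (q, p')))).filter (fun ev => ev.2.1 == p.1)
      = ens.map (fun q => (q, p)) := by
  induction ens with
  | nil => rfl
  | cons q rest ih =>
    rw [List.flatMap_cons, List.filter_append, ih, List.map_cons]
    have hblk : (uw.map (fun p' => (q, p'))).filter
          (fun (ev : (String × String) × (String × List String)) => ev.2.1 == p.1)
        = (uw.filter (fun p' => p'.1 == p.1)).map (fun p' => (q, p')) := by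
      rw [List.filter_map]
      rfl
    rw [hblk, pv_filter_key_singleton uw h1 p hp]
    rfl

theorem pv_renameA (uw : List (String × List String)) (eds ens : List (String × String))
    (h1 : (uw.map Prod.fst).Nodup) (h3 : (ens.map Prod.fst).Nodup)
    (h4 : List.Pairwise (fun (a b : String × String) => a.2 ≠ b.1) ens) :
    cweA_rename uw ens
      (PySem.Dict.mk (uw.map (fun p => (p.1, PySem.Dict.mk (ens.map (fun q => (q.1, pvCnt eds p.2 q.1)))))),
       PySem.Dict.mk (ens.map (fun q => (q.1, PySem.Dict.mk (uw.map (fun p => (p.1, pvCnt eds p.2 q.1)))))))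
    = (PySem.Dict.mk (uw.map (fun p => (p.1,
         ens.foldl (fun c q => c.insert q.2 (pvCnt eds p.2 q.1)) PySem.Dict.empty))),
       ens.foldl (fun d q => d.insert q.2
         (PySem.Dict.mk (uw.map (fun p => (p.1, pvCnt eds p.2 q.1))))) PySem.Dict.empty) := by
  unfold cweA_rename
  have hdisp : ∀ q ∈ ens, ((PySem.Dict.mk ens).get? q.1).getD "" = q.2 := by
    intro q hq
    rw [PySem.Dict.get?_of_mem_items (PySem.Dict.mk ens) (show (q.1, q.2) ∈ ens from hq)
      (by rw [PySem.Dict.keys_mk]; exact h3)]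
    rfl
  refine Eq.trans (PySem.List.foldl_congr_mem ens _
    (fun (s : PySem.Dict String (PySem.Dict String Int) × PySem.Dict String (PySem.Dict String Int)) q => (uw.foldl (fun (wte : PySem.Dict String (PySem.Dict String Int)) p => wte.modify p.1 PySem.Dict.empty
        (fun d => (d.erase q.1).insert q.2 ((d.get? q.1).getD 0))) s.1,
      ((s.2).erase q.1).insert q.2 (((s.2).get? q.1).getD PySem.Dict.empty))) _ ?_) ?_
  · intro s q hq
    rw [hdisp q hq]
  refine Eq.trans (pv_foldl_pair ens _
    (fun (w : PySem.Dict String (PySem.Dict String Int)) q => uw.foldl (fun (wte : PySem.Dict String (PySem.Dict String Int)) p => wte.modify p.1 PySem.Dict.empty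
        (fun d => (d.erase q.1).insert q.2 ((d.get? q.1).getD 0))) w)
    (fun (t : PySem.Dict String (PySem.Dict String Int)) q => (t.erase q.1).insert q.2 ((t.get? q.1).getD PySem.Dict.empty))
    (fun s q => rfl) _ _) ?_
  refine congrArg₂ Prod.mk ?_ ?_
  · refine Eq.trans (PySem.List.foldl_congr_mem ens _
      (fun (w : PySem.Dict String (PySem.Dict String Int)) q => (uw.map (fun p => (q, p))).foldl
        (fun (w : PySem.Dict String (PySem.Dict String Int)) (ev : (String × String) × (String × List String)) => w.modify ev.2.1 PySem.Dict.empty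
          (fun d => (d.erase ev.1.1).insert ev.1.2 ((d.get? ev.1.1).getD 0))) w) _
      (fun w q _ => by
        exact (List.foldl_map (f := fun p => (q, p))
          (g := fun (w : PySem.Dict String (PySem.Dict String Int))
              (ev : (String × String) × (String × List String)) => w.modify ev.2.1 PySem.Dict.empty
            (fun d => (d.erase ev.1.1).insert ev.1.2 ((d.get? ev.1.1).getD 0)))).symm)) ?_
    refine Eq.trans (pv_foldl_flatMap ens (fun q => uw.map (fun p => (q, p)))
      (fun (w : PySem.Dict String (PySem.Dict String Int)) (ev : (String × String) × (String × List String)) => w.modify ev.2.1 PySem.Dict.empty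
        (fun d => (d.erase ev.1.1).insert ev.1.2 ((d.get? ev.1.1).getD 0)))
      (PySem.Dict.mk (uw.map (fun p => (p.1,
        PySem.Dict.mk (ens.map (fun q => (q.1, pvCnt eds p.2 q.1)))))))) ?_
    refine Eq.trans (pv_modify_events_map (ens.flatMap (fun q => uw.map (fun p => (q, p))))
      (fun (ev : (String × String) × (String × List String)) => ev.2.1)
      (fun (ev : (String × String) × (String × List String)) (d : PySem.Dict String Int) => (d.erase ev.1.1).insert ev.1.2 ((d.get? ev.1.1).getD 0)) PySem.Dict.empty
      uw (fun p => p.1) (fun p => PySem.Dict.mk (ens.map (fun q => (q.1, pvCnt eds p.2 q.1))))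
      h1
      (by
        intro ev hev
        obtain ⟨q', hq', hin⟩ := List.mem_flatMap.mp hev
        obtain ⟨p', hp', rfl⟩ := List.mem_map.mp hin
        exact List.mem_map.mpr ⟨p', hp', rfl⟩)) ?_
    apply PySem.Dict.ext
    show List.map _ _ = List.map _ _
    apply List.map_congr_left
    intro p hp
    refine congrArg (Prod.mk p.1) ?_
    rw [pv_blockfilter_snd ens uw h1 p hp]
    refine Eq.trans (List.foldl_map) ?_
    have hstart : (PySem.Dict.mk (ens.map (fun q => (q.1, pvCnt eds p.2 q.1))) : PySem.Dict String Int)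
        = PySem.Dict.mk (ens.map (fun q => (q.1, pvCnt eds p.2 q.1))
            ++ (PySem.Dict.empty : PySem.Dict String Int).items) := by
      apply PySem.Dict.ext
      exact (List.append_nil _).symm
    rw [hstart]
    exact pv_rename_fold 0 ens (fun q => pvCnt eds p.2 q.1) PySem.Dict.empty h3 h4
      (fun a _ => PySem.Dict.contains_empty a.1)
  · have hstart : PySem.Dict.mk (ens.map (fun q => (q.1,
          PySem.Dict.mk (uw.map (fun p => (p.1, pvCnt eds p.2 q.1))))))
        = PySem.Dict.mk (ens.map (fun q => (q.1,
            PySem.Dict.mk (uw.map (fun p => (p.1, pvCnt eds p.2 q.1)))))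
            ++ (PySem.Dict.empty : PySem.Dict String (PySem.Dict String Int)).items) := by
      apply PySem.Dict.ext
      exact (List.append_nil _).symm
    rw [hstart]
    exact pv_rename_fold PySem.Dict.empty ens
      (fun q => PySem.Dict.mk (uw.map (fun p => (p.1, pvCnt eds p.2 q.1)))) PySem.Dict.empty
      h3 h4 (fun a _ => PySem.Dict.contains_empty a.1)

theorem pv_delA_wte (uw : List (String × List String)) (ens : List (String × String))
    (h1 : (uw.map Prod.fst).Nodup) (cv : (String × List String) → (String × String) → Int) :
    uw.foldl (fun wte p => wte.modify p.1 PySem.Dict.empty (fun d => d.erase "Unclassified"))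
      (PySem.Dict.mk (uw.map (fun p => (p.1,
        ens.foldl (fun c q => c.insert q.2 (cv p q)) PySem.Dict.empty))))
    = PySem.Dict.mk (uw.map (fun p => (p.1,
        (ens.filter (fun q => !(q.2 == "Unclassified"))).foldl
          (fun c q => c.insert q.2 (cv p q)) PySem.Dict.empty))) := by
  refine Eq.trans (pv_modify_events_map uw (fun p => p.1) (fun _ d => d.erase "Unclassified")
    PySem.Dict.empty uw (fun p => p.1)
    (fun p => ens.foldl (fun c q => c.insert q.2 (cv p q)) PySem.Dict.empty) h1
    (fun p hp => List.mem_map.mpr ⟨p, hp, rfl⟩)) ?_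
  apply PySem.Dict.ext
  show List.map _ _ = List.map _ _
  apply List.map_congr_left
  intro p hp
  refine congrArg (Prod.mk p.1) ?_
  rw [pv_filter_key_singleton uw h1 p hp]
  show (ens.foldl (fun c q => c.insert q.2 (cv p q)) PySem.Dict.empty).erase "Unclassified" = _
  exact (pv_erase_foldl_insert ens (fun q => cv p q) PySem.Dict.empty "Unclassified").trans rfl

theorem pv_delA_wet (ens : List (String × String)) (dv : (String × String) → PySem.Dict String Int) :
    (ens.foldl (fun d q => d.insert q.2 (dv q)) PySem.Dict.empty).erase "Unclassified"
    = (ens.filter (fun q => !(q.2 == "Unclassified"))).foldl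
        (fun d q => d.insert q.2 (dv q)) PySem.Dict.empty :=
  (pv_erase_foldl_insert ens dv PySem.Dict.empty "Unclassified").trans rfl

theorem pv_delA (uw : List (String × List String)) (eds ens : List (String × String))
    (wu : Bool) (h1 : (uw.map Prod.fst).Nodup) :
    cweA_del uw wu
      (PySem.Dict.mk (uw.map (fun p => (p.1,
         ens.foldl (fun c q => c.insert q.2 (pvCnt eds p.2 q.1)) PySem.Dict.empty))),
       ens.foldl (fun d q => d.insert q.2
         (PySem.Dict.mk (uw.map (fun p => (p.1, pvCnt eds p.2 q.1))))) PySem.Dict.empty)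
    = (PySem.Dict.mk (uw.map (fun p => (p.1,
         (ens.filter (fun q => wu || q.2 ≠ "Unclassified")).foldl
           (fun c q => c.insert q.2 (pvCnt eds p.2 q.1)) PySem.Dict.empty))),
       (ens.filter (fun q => wu || q.2 ≠ "Unclassified")).foldl
         (fun d q => d.insert q.2
           (PySem.Dict.mk (uw.map (fun p => (p.1, pvCnt eds p.2 q.1))))) PySem.Dict.empty) := by
  cases wu with
  | true =>
    have hf : ens.filter (fun q => true || q.2 ≠ "Unclassified") = ens := by
      simp
    rw [hf]
    rfl
  | false =>
    have hf : ens.filter (fun q => false || q.2 ≠ "Unclassified")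
        = ens.filter (fun q => !(q.2 == "Unclassified")) := by
      apply List.filter_congr
      intro q _
      show (false || decide ¬(q.2 = "Unclassified")) = !(q.2 == "Unclassified")
      rw [Bool.false_or, decide_not]
      rfl
    rw [hf]
    unfold cweA_del
    rw [if_pos (show (!false) = true from rfl)]
    exact congrArg₂ Prod.mk
      (pv_delA_wte uw ens h1 (fun p q => pvCnt eds p.2 q.1))
      (pv_delA_wet ens (fun q => PySem.Dict.mk (uw.map (fun p => (p.1, pvCnt eds p.2 q.1)))))

theorem pv_counts_char (uw : List (String × List String)) (eds : List (String × String))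
    (h1 : (uw.map Prod.fst).Nodup) :
    cweB_counts uw eds = PySem.Dict.mk (uw.map (fun p => (p.1,
      p.2.foldl (fun (c : PySem.Dict String Int) w => match (PySem.Dict.mk eds).get? w with
        | some e => c.insert e (c.getD e 0 + 1)
        | none => c) PySem.Dict.empty))) := by
  unfold cweB_counts
  exact pv_fresh_fold uw (fun p => p.1) _ h1

theorem pv_counts_getD (eds : List (String × String)) (ws : List String) (k : String) :
    (ws.foldl (fun (c : PySem.Dict String Int) w => match (PySem.Dict.mk eds).get? w with
        | some e => c.insert e (c.getD e 0 + 1)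
        | none => c) PySem.Dict.empty).getD k 0 = pvCnt eds ws k := by
  have hc : ws.foldl (fun (c : PySem.Dict String Int) w => match (PySem.Dict.mk eds).get? w with
        | some e => c.insert e (c.getD e 0 + 1)
        | none => c) PySem.Dict.empty
      = (pvE eds ws).foldl (fun (c : PySem.Dict String Int) e => c.insert e (c.getD e 0 + 1))
          PySem.Dict.empty := by
    refine Eq.trans (PySem.List.foldl_congr_mem ws _
      (fun (c : PySem.Dict String Int) x => ((PySem.Dict.mk eds).get? x).elim c
        (fun e => c.insert e (c.getD e 0 + 1))) PySem.Dict.empty ?_) ?_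
    · intro c x _
      cases hx : (PySem.Dict.mk eds).get? x <;> simp only [hx, Option.elim_none, Option.elim_some]
    exact pv_foldl_filterMap ws (fun w => (PySem.Dict.mk eds).get? w)
      (fun (c : PySem.Dict String Int) e => c.insert e (c.getD e 0 + 1)) PySem.Dict.empty
  rw [hc, PySem.Dict.getD_foldl_insert_add_one (pvE eds ws) PySem.Dict.empty k,
    PySem.Dict.getD_empty, zero_add]
  rfl

theorem pv_B_get (uw : List (String × List String)) (eds : List (String × String))
    (h1 : (uw.map Prod.fst).Nodup) (p : String × List String) (hp : p ∈ uw) :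
    (cweB_counts uw eds).get? p.1 = some (p.2.foldl (fun (c : PySem.Dict String Int) w =>
      match (PySem.Dict.mk eds).get? w with
      | some e => c.insert e (c.getD e 0 + 1)
      | none => c) PySem.Dict.empty) := by
  rw [pv_counts_char uw eds h1]
  exact PySem.Dict.get?_of_mem_items _ (List.mem_map.mpr ⟨p, hp, rfl⟩)
    (by rw [PySem.Dict.keys_mk, List.map_map]; exact h1)

theorem pv_B_wte (uw : List (String × List String)) (eds : List (String × String))
    (ln : List (String × String)) (h1 : (uw.map Prod.fst).Nodup) :
    uw.foldl (fun d p => d.insert p.1 (ln.foldl (fun c q =>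
        c.insert q.2 ((((cweB_counts uw eds).get? p.1).getD PySem.Dict.empty).getD q.1 0))
      PySem.Dict.empty)) PySem.Dict.empty
    = PySem.Dict.mk (uw.map (fun p => (p.1,
        ln.foldl (fun c q => c.insert q.2 (pvCnt eds p.2 q.1)) PySem.Dict.empty))) := by
  refine Eq.trans (pv_fresh_fold uw (fun p => p.1) _ h1) ?_
  apply PySem.Dict.ext
  show List.map _ _ = List.map _ _
  apply List.map_congr_left
  intro p hp
  refine congrArg (Prod.mk p.1) ?_
  refine PySem.List.foldl_congr_mem ln _ _ _ ?_
  intro c q _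
  rw [pv_B_get uw eds h1 p hp]
  rw [Option.getD_some, pv_counts_getD eds p.2 q.1]

theorem pv_B_wet (uw : List (String × List String)) (eds : List (String × String))
    (ln : List (String × String)) (h1 : (uw.map Prod.fst).Nodup) :
    ln.foldl (fun d q => d.insert q.2 (uw.foldl (fun c p =>
        c.insert p.1 ((((cweB_counts uw eds).get? p.1).getD PySem.Dict.empty).getD q.1 0))
      PySem.Dict.empty)) PySem.Dict.empty
    = ln.foldl (fun d q => d.insert q.2
        (PySem.Dict.mk (uw.map (fun p => (p.1, pvCnt eds p.2 q.1))))) PySem.Dict.empty := by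
  refine PySem.List.foldl_congr_mem ln _ _ _ ?_
  intro d q _
  refine congrArg (d.insert q.2) ?_
  refine Eq.trans (PySem.List.foldl_congr_mem uw _
    (fun c p => c.insert p.1 (pvCnt eds p.2 q.1)) _ ?_) ?_
  · intro c p hp
    rw [pv_B_get uw eds h1 p hp]
    rw [Option.getD_some, pv_counts_getD eds p.2 q.1]
  · exact pv_fresh_fold uw (fun p => p.1) _ h1

theorem pv_map_items {α : Type} (l : List α) (k : α → String) (F : α → PySem.Dict String Int) :
    (l.map (fun p => (k p, F p))).map (fun r => (r.1, r.2.items))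
      = l.map (fun p => (k p, (F p).items)) := by
  rw [List.map_map]
  rfl

theorem pv_A_char (uw : List (String × List String)) (eds ens : List (String × String)) (wu : Bool)
    (hpre : Pre_convert_words_to_emotions uw eds ens wu) :
    convert_words_to_emotions uw eds ens wu
      = (uw.map (fun p => (p.1,
           ((ens.filter (fun q => wu || q.2 ≠ "Unclassified")).foldl
             (fun c q => c.insert q.2 (pvCnt eds p.2 q.1)) PySem.Dict.empty).items)),
         ((ens.filter (fun q => wu || q.2 ≠ "Unclassified")).foldl
            (fun d q => d.insert q.2
              (PySem.Dict.mk (uw.map (fun p => (p.1, pvCnt eds p.2 q.1))))) PySem.Dict.empty).items.map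
           (fun p => (p.1, p.2.items))) := by
  obtain ⟨h1, _h2, h3, h4, h5', h6⟩ := hpre
  have h5 : ∀ p ∈ uw, ∀ e ∈ pvE eds p.2, e ∈ ens.map Prod.fst := by
    intro p hp e he
    obtain ⟨w, hw, hgw⟩ := List.mem_filterMap.mp he
    exact h5' p hp w hw e hgw
  show ((cweA_del uw wu (cweA_rename uw ens (cweA_count uw eds
        (cweA_init_wte uw ens, cweA_init_wet uw ens)))).1.items.map (fun p => (p.1, p.2.items)),
       (cweA_del uw wu (cweA_rename uw ens (cweA_count uw eds
        (cweA_init_wte uw ens, cweA_init_wet uw ens)))).2.items.map (fun p => (p.1, p.2.items))) = _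
  rw [pv_initA_wte uw ens h1 h3, pv_initA_wet uw ens h1 h3,
    pv_countA uw eds ens h1 h3 h5, pv_renameA uw eds ens h1 h3 h4, pv_delA uw eds ens wu h1]
  exact congrArg₂ Prod.mk (pv_map_items uw _ _) rfl

theorem pv_B_char (uw : List (String × List String)) (eds ens : List (String × String)) (wu : Bool)
    (hpre : Pre_convert_words_to_emotions uw eds ens wu) :
    convert_words_to_emotions_alt uw eds ens wu
      = (uw.map (fun p => (p.1,
           ((ens.filter (fun q => wu || q.2 ≠ "Unclassified")).foldl
             (fun c q => c.insert q.2 (pvCnt eds p.2 q.1)) PySem.Dict.empty).items)),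
         ((ens.filter (fun q => wu || q.2 ≠ "Unclassified")).foldl
            (fun d q => d.insert q.2
              (PySem.Dict.mk (uw.map (fun p => (p.1, pvCnt eds p.2 q.1))))) PySem.Dict.empty).items.map
           (fun p => (p.1, p.2.items))) := by
  obtain ⟨h1, _, _, _, _, _⟩ := hpre
  show ((uw.foldl (fun d p => d.insert p.1 ((ens.filter (fun q => wu || q.2 ≠ "Unclassified")).foldl
          (fun c q => c.insert q.2 ((((cweB_counts uw eds).get? p.1).getD PySem.Dict.empty).getD q.1 0))
          PySem.Dict.empty)) PySem.Dict.empty).items.map (fun p => (p.1, p.2.items)),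
        ((ens.filter (fun q => wu || q.2 ≠ "Unclassified")).foldl (fun d q => d.insert q.2
          (uw.foldl (fun c p => c.insert p.1 ((((cweB_counts uw eds).get? p.1).getD PySem.Dict.empty).getD q.1 0))
            PySem.Dict.empty)) PySem.Dict.empty).items.map (fun p => (p.1, p.2.items))) = _
  rw [pv_B_wte uw eds (ens.filter (fun q => wu || q.2 ≠ "Unclassified")) h1,
      pv_B_wet uw eds (ens.filter (fun q => wu || q.2 ≠ "Unclassified")) h1]
  exact congrArg₂ Prod.mk (pv_map_items uw _ _) rfl

-- ===== VERDICT (by name: the statement is the Claim_ definition above) =====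
theorem convert_words_to_emotions_spec : Claim_equal_convert_words_to_emotions := by
  intro uw eds ens wu _hdom hpre
  show _ = _
  rw [pv_A_char uw eds ens wu hpre, pv_B_char uw eds ens wu hpre]
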